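-- pv_equiv track=rewrite | github.com/bzinberg/playbx_progchal | hailey_speed.py | is_sorted_wrt
-- ===== SOURCE A (Python) =====
-- import collections
--
-- def is_sorted_wrt(s, p):
--     p_hash = collections.defaultdict(lambda: None)
--     for i in range(len(p)):
--         p_hash[p[i]] = i
--
--     current_index = 0
--     for letter in s:
--         p_index = p_hash[letter]
--         if p_index is not None:
--             if p_index < current_index:
--                 return False
--             current_index = p_index if p_index > current_index else current_index
--     return True
-- ===== SOURCE B (Python) =====
-- def is_sorted_wrt(s, p):
--     pos = {c: i for i, c in enumerate(p)}
--     positions = [pos[c] for c in s if c in pos]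
--     return positions == sorted(positions)
-- ===== Notes on version B (the rewrite author's own statement) =====
-- stated objective: simpler
-- what changed: Replaces A's accumulator-threaded scan with early return by a sort-and-compare check: collect the positions of s's characters that occur in p and test whether that list is a fixpoint of sorting (positions == sorted(positions)); no running max, no pairwise comparison loop.
import Mathlib
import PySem

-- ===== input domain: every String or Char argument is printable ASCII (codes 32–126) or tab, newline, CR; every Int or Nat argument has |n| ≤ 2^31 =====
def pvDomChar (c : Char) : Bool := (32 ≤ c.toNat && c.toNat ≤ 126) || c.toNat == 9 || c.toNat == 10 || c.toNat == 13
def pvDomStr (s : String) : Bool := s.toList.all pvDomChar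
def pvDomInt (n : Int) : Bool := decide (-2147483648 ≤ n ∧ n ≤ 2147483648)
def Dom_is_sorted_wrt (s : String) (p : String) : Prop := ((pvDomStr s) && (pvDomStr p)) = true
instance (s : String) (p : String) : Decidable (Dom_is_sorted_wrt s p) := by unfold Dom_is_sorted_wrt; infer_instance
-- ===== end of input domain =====

-- B replaces A's running-max scan with early return by a sort-and-compare check:
-- collect the positions of s's chars occurring in p and test positions == sorted(positions) (simpler).

-- ===== PORT A =====
-- the 'for letter in s' loop with early 'return False' and threaded current_index
def pvA_loop (d : PySem.Dict Char Int) : List Char → Int → Bool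
  | [], _ => true
  | c :: rest, cur =>
    match d.get? c with
    | some pi =>
        if pi < cur then false
        else pvA_loop d rest (if pi > cur then pi else cur)
    | none => pvA_loop d rest cur

def is_sorted_wrt (s : String) (p : String) : Bool :=
  -- for i in range(len(p)): p_hash[p[i]] = i   (defaultdict: get? = none plays None)
  let p_hash := (PySem.List.pyRange 0 (PySem.List.len p.toList) 1).foldl
      (fun d i => d.insert (PySem.List.pyGetD p.toList i ' ') i) PySem.Dict.empty
  pvA_loop p_hash s.toList 0

-- ===== PORT B =====
def is_sorted_wrt_alt (s : String) (p : String) : Bool :=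
  let pos := (PySem.List.enumerate p.toList 0).foldl
      (fun d ic => d.insert ic.2 ic.1) (PySem.Dict.empty : PySem.Dict Char Int)
  let positions := s.toList.filterMap (fun c => pos.get? c)
  positions == PySem.List.sorted positions (fun x => x) false

-- ===== PRECONDITION & SPEC =====
def Spec_is_sorted_wrt (s : String) (p : String) (out : Bool) : Prop := out = is_sorted_wrt_alt s p
instance (s : String) (p : String) (out : Bool) : Decidable (Spec_is_sorted_wrt s p out) := by unfold Spec_is_sorted_wrt; infer_instance

-- ===== CLAIM (what is proved, stated in full; the proofs are below) =====
def Claim_equal_is_sorted_wrt : Prop := ∀ (s : String) (p : String), Dom_is_sorted_wrt s p → Spec_is_sorted_wrt s p (is_sorted_wrt s p)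

-- ===== LEMMAS AND PROOFS =====

-- boolean "non-decreasing" predicate mediating between the two characterisations
def pvNondec : List Int → Bool
  | a :: b :: t => decide (a ≤ b) && pvNondec (b :: t)
  | _ => true

-- the two dict-building loops build the same dict
theorem pv_dict_eq (p : List Char) :
    (PySem.List.pyRange 0 (PySem.List.len p) 1).foldl
      (fun d i => d.insert (PySem.List.pyGetD p i ' ') i) PySem.Dict.empty
    = (PySem.List.enumerate p 0).foldl
      (fun d ic => d.insert ic.2 ic.1) (PySem.Dict.empty : PySem.Dict Char Int) := by
  rw [PySem.List.enumerate_eq_map_pyRange p ' ', List.foldl_map]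

-- every value stored by B's fold from a nonneg-valued dict and nonneg pairs is nonneg
theorem pv_fold_nonneg (l : List (Int × Char)) (d : PySem.Dict Char Int)
    (hd : ∀ c v, d.get? c = some v → 0 ≤ v) (hl : ∀ q ∈ l, 0 ≤ q.1) :
    ∀ c v, (l.foldl (fun d ic => d.insert ic.2 ic.1) d).get? c = some v → 0 ≤ v := by
  induction l generalizing d with
  | nil => exact hd
  | cons q t ih =>
      intro c v hv
      refine ih _ ?_ (fun q hq => hl q (List.mem_cons_of_mem _ hq)) c v hv
      intro c' v' h
      rw [PySem.Dict.get?_insert] at h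
      split at h
      · cases h; exact hl q (List.mem_cons_self)
      · exact hd c' v' h

theorem pv_values_nonneg (p : List Char) (c : Char) (v : Int)
    (h : ((PySem.List.enumerate p 0).foldl
      (fun d ic => d.insert ic.2 ic.1) (PySem.Dict.empty : PySem.Dict Char Int)).get? c = some v) :
    0 ≤ v := by
  refine pv_fold_nonneg _ _ (fun c v h => by simp [PySem.Dict.get?_empty] at h) ?_ c v h
  intro q hq
  rcases (PySem.List.mem_enumerate_iff _ _ _).1 hq with ⟨k, hk, rfl⟩
  simp

-- A's scan computes pvNondec of current_index consed onto the collected positions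
theorem pvA_loop_eq_nondec (d : PySem.Dict Char Int) (l : List Char) (cur : Int) :
    pvA_loop d l cur = pvNondec (cur :: l.filterMap (fun c => d.get? c)) := by
  induction l generalizing cur with
  | nil => simp [pvA_loop, pvNondec]
  | cons c rest ih =>
      simp only [pvA_loop, List.filterMap_cons]
      cases h : d.get? c with
      | none => simpa using ih cur
      | some pi =>
          simp only [pvNondec]
          by_cases hlt : pi < cur
          · simp [hlt, show ¬ cur ≤ pi by omega]
          · have hcur : (if pi > cur then pi else cur) = pi := by
              split <;> omega
            simp [hlt, hcur, ih pi, show cur ≤ pi by omega]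

theorem pvNondec_iff_pairwise : ∀ xs : List Int, pvNondec xs = true ↔ xs.Pairwise (· ≤ ·)
  | [] => by simp [pvNondec]
  | [a] => by simp [pvNondec]
  | a :: b :: t => by
      rw [pvNondec]
      simp only [Bool.and_eq_true, decide_eq_true_eq, pvNondec_iff_pairwise (b :: t),
        List.pairwise_cons]
      constructor
      · rintro ⟨hab, hb, ht⟩
        refine ⟨fun c hc => ?_, hb, ht⟩
        rcases List.mem_cons.1 hc with rfl | hc
        · exact hab
        · exact le_trans hab (hb c hc)
      · rintro ⟨ha, hb, ht⟩
        exact ⟨ha b List.mem_cons_self, hb, ht⟩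

-- B's sort-fixpoint test computes pvNondec
theorem pv_sorted_eq_nondec (xs : List Int) :
    (xs == PySem.List.sorted xs (fun x => x) false) = pvNondec xs := by
  have h : xs = PySem.List.sorted xs (fun x => x) false ↔ pvNondec xs = true := by
    constructor
    · intro he
      rw [pvNondec_iff_pairwise]
      have h2 := PySem.List.sorted_pairwise xs (fun x => x) (κ := Int)
      rw [← he] at h2
      simpa using h2
    · intro hnd
      have hp : xs.Pairwise (fun a b => (fun x : Int => x) a ≤ (fun x : Int => x) b) := by
        simpa using (pvNondec_iff_pairwise xs).mp hnd
      exact (PySem.List.sorted_eq_self_of_pairwise xs (fun x => x) hp).symm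
  cases hnd : pvNondec xs with
  | false =>
      simp only [beq_eq_false_iff_ne, ne_eq]
      intro he
      rw [h.mp he] at hnd
      simp at hnd
  | true => exact beq_iff_eq.mpr (h.mpr hnd)

-- ===== VERDICT (by name: the statement is the Claim_ definition above) =====
theorem is_sorted_wrt_spec : Claim_equal_is_sorted_wrt := by
  intro s p _
  unfold Spec_is_sorted_wrt is_sorted_wrt is_sorted_wrt_alt
  rw [pv_dict_eq, pvA_loop_eq_nondec, pv_sorted_eq_nondec]
  cases hxs : s.toList.filterMap (fun c =>
      ((PySem.List.enumerate p.toList 0).foldl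
        (fun d ic => d.insert ic.2 ic.1) (PySem.Dict.empty : PySem.Dict Char Int)).get? c) with
  | nil => rfl
  | cons x t =>
      have hx : 0 ≤ x := by
        have : x ∈ x :: t := List.mem_cons_self
        rw [← hxs] at this
        rcases List.mem_filterMap.1 this with ⟨c, _, hc⟩
        exact pv_values_nonneg p.toList c x hc
      simp [pvNondec, hx]
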